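-- pv_equiv track=rewrite | github.com/toilaluan/beacon-hf | seed.py | insert_checkpoints_with_labels
-- ===== SOURCE A (Python) =====
-- from typing import Callable, Iterable, Iterator, List, Sequence, Tuple, Dict, Optional
--
-- def insert_checkpoints_with_labels(
--     token_ids: Sequence[int],
--     labels: Sequence[int],
--     stride: int,
--     ckpt_id: int,
--     use_ckpt: bool,
-- ) -> Tuple[List[int], List[int]]:
--     """
--     Insert checkpoint tokens while tracking original label positions.
--
--     labels[i] is a marker for token_ids[i] (e.g., 0=prompt, 1=choice). Checkpoints inherit 0.
--     """
--     if len(token_ids) != len(labels):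
--         raise ValueError("token_ids and labels must have the same length")
--     if stride <= 0:
--         return list(token_ids), list(labels)
--
--     out_tokens: List[int] = []
--     out_labels: List[int] = []
--
--     for start in range(0, len(token_ids), stride):
--         end = min(start + stride, len(token_ids))
--         out_tokens.extend(token_ids[start:end])
--         out_labels.extend(labels[start:end])
--         if end < len(token_ids) and use_ckpt:
--             out_tokens.append(ckpt_id)
--             out_labels.append(0)
--     return out_tokens, out_labels
-- ===== SOURCE B (Python) =====
-- from typing import List, Sequence, Tuple
--
-- def insert_checkpoints_with_labels(
--     token_ids: Sequence[int],
--     labels: Sequence[int],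
--     stride: int,
--     ckpt_id: int,
--     use_ckpt: bool,
-- ) -> Tuple[List[int], List[int]]:
--     """Declarative single pass: each position i emits its own token (label),
--     followed by a checkpoint token (label 0) exactly when i+1 is an interior
--     stride boundary; the two outputs are flat comprehensions over enumerate."""
--     if len(token_ids) != len(labels):
--         raise ValueError("token_ids and labels must have the same length")
--     if stride <= 0:
--         return list(token_ids), list(labels)
--     n = len(token_ids)
--     out_tokens = [
--         x
--         for i, t in enumerate(token_ids)
--         for x in ([t, ckpt_id] if use_ckpt and (i + 1) % stride == 0 and i + 1 < n else [t])
--     ]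
--     out_labels = [
--         x
--         for i, l in enumerate(labels)
--         for x in ([l, 0] if use_ckpt and (i + 1) % stride == 0 and i + 1 < n else [l])
--     ]
--     return out_tokens, out_labels
-- ===== Notes on version B (the rewrite author's own statement) =====
-- stated objective: alternative
-- what changed: Replaced A's accumulator loop over stride-sized chunk starts (slice, extend, conditional append) with two declarative flat comprehensions over enumerate, each position emitting itself plus a checkpoint exactly at interior modular stride boundaries.
import Mathlib
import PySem

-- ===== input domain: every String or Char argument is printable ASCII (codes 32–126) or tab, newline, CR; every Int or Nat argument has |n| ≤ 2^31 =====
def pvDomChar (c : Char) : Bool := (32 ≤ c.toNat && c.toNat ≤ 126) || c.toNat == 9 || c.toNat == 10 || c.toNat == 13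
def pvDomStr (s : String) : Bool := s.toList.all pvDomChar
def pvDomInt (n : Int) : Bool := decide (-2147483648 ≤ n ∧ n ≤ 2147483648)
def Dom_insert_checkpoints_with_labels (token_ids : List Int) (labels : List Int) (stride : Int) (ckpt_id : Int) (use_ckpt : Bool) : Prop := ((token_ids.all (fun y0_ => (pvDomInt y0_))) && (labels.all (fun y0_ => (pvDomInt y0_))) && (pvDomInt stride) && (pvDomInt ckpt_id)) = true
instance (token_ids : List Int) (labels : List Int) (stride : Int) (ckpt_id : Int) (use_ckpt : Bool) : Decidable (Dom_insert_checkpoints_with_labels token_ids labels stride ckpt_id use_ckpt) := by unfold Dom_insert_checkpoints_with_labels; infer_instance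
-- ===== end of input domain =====

-- B replaces A's accumulator loop over stride-sized chunk starts (slice/extend/append)
-- with two declarative flat comprehensions over enumerate, each position emitting its
-- own element plus a checkpoint exactly at interior modular stride boundaries
-- (alternative decomposition, same O(n) cost); return values proved equal whenever the
-- two input lists have the same length (otherwise both raise ValueError).

-- ===== PORT A =====
def insert_checkpoints_with_labels (token_ids : List Int) (labels : List Int) (stride : Int) (ckpt_id : Int) (use_ckpt : Bool) : List Int × List Int :=
  if token_ids.length ≠ labels.length then ([], [])  -- Python raises ValueError here; excluded by Pre_
  else if stride ≤ 0 then (token_ids, labels)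
  else
    (PySem.List.pyRange 0 (token_ids.length : Int) stride).foldl
      (fun acc start =>
        let e := min (start + stride) (token_ids.length : Int)
        let out_tokens := acc.1 ++ PySem.List.slice token_ids (some start) (some e)
        let out_labels := acc.2 ++ PySem.List.slice labels (some start) (some e)
        if e < (token_ids.length : Int) ∧ use_ckpt = true then
          (out_tokens ++ [ckpt_id], out_labels ++ [0])
        else (out_tokens, out_labels))
      ([], [])

-- ===== PORT B =====
def insert_checkpoints_with_labels_alt (token_ids : List Int) (labels : List Int) (stride : Int) (ckpt_id : Int) (use_ckpt : Bool) : List Int × List Int :=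
  if token_ids.length ≠ labels.length then ([], [])  -- Python raises ValueError here; excluded by Pre_
  else if stride ≤ 0 then (token_ids, labels)
  else
    ((PySem.List.enumerate token_ids 0).flatMap
       (fun p => if use_ckpt = true ∧ PySem.Int.mod (p.1 + 1) stride = 0 ∧ p.1 + 1 < (token_ids.length : Int) then [p.2, ckpt_id] else [p.2]),
     (PySem.List.enumerate labels 0).flatMap
       (fun p => if use_ckpt = true ∧ PySem.Int.mod (p.1 + 1) stride = 0 ∧ p.1 + 1 < (token_ids.length : Int) then [p.2, (0 : Int)] else [p.2]))

-- ===== PRECONDITION & SPEC =====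
-- Pre_ excludes exactly the inputs where Python A raises ValueError (length mismatch); B raises there too.
def Pre_insert_checkpoints_with_labels (token_ids : List Int) (labels : List Int) (stride : Int) (ckpt_id : Int) (use_ckpt : Bool) : Prop :=
  token_ids.length = labels.length
instance (token_ids : List Int) (labels : List Int) (stride : Int) (ckpt_id : Int) (use_ckpt : Bool) : Decidable (Pre_insert_checkpoints_with_labels token_ids labels stride ckpt_id use_ckpt) := by unfold Pre_insert_checkpoints_with_labels; infer_instance

def pvWitness_insert_checkpoints_with_labels : List Int × List Int × Int × Int × Bool := ([1, 2, 3], [0, 0, 1], 2, 9, true)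

def Spec_insert_checkpoints_with_labels (token_ids : List Int) (labels : List Int) (stride : Int) (ckpt_id : Int) (use_ckpt : Bool) (out : List Int × List Int) : Prop := out = insert_checkpoints_with_labels_alt token_ids labels stride ckpt_id use_ckpt
instance (token_ids : List Int) (labels : List Int) (stride : Int) (ckpt_id : Int) (use_ckpt : Bool) (out : List Int × List Int) : Decidable (Spec_insert_checkpoints_with_labels token_ids labels stride ckpt_id use_ckpt out) := by unfold Spec_insert_checkpoints_with_labels; infer_instance

-- ===== CLAIM (what is proved, stated in full; the proofs are below) =====
def Claim_equal_insert_checkpoints_with_labels : Prop := ∀ (token_ids : List Int) (labels : List Int) (stride : Int) (ckpt_id : Int) (use_ckpt : Bool), Dom_insert_checkpoints_with_labels token_ids labels stride ckpt_id use_ckpt → Pre_insert_checkpoints_with_labels token_ids labels stride ckpt_id use_ckpt → Spec_insert_checkpoints_with_labels token_ids labels stride ckpt_id use_ckpt (insert_checkpoints_with_labels token_ids labels stride ckpt_id use_ckpt)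

-- ===== LEMMAS AND PROOFS =====

-- range(a, b, s) with 0 < s is empty when b ≤ a
theorem pvRange_pos_nil (a b : Int) {s : Int} (hs : 0 < s) (h : b ≤ a) :
    PySem.List.pyRange a b s = [] := by
  rw [PySem.List.pyRange_of_pos a b hs, if_neg (by omega)]
  simp

-- cons form of range(a, b, s) for 0 < s, a < b
theorem pvRange_pos_cons (a b : Int) {s : Int} (hs : 0 < s) (hab : a < b) :
    PySem.List.pyRange a b s = a :: PySem.List.pyRange (a + s) b s := by
  rw [PySem.List.pyRange_of_pos a b hs, PySem.List.pyRange_of_pos (a + s) b hs,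
      if_pos hab]
  have hshift : (b - a + s - 1) / s = (b - (a + s) + s - 1) / s + 1 := by
    have : b - a + s - 1 = (b - (a + s) + s - 1) + 1 * s := by ring
    rw [this, Int.add_mul_ediv_right _ _ (by omega : s ≠ 0)]
  by_cases hfull : a + s < b
  · rw [if_pos hfull, hshift]
    have hnn : 0 ≤ (b - (a + s) + s - 1) / s := by
      apply Int.ediv_nonneg <;> omega
    have h1 : ((b - (a + s) + s - 1) / s + 1).toNat = ((b - (a + s) + s - 1) / s).toNat + 1 := by omega
    rw [h1, List.range_succ_eq_map]
    simp only [List.map_cons, List.map_map]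
    congr 1
    · simp
    · apply List.map_congr_left
      intro k _
      simp only [Function.comp_apply]
      push_cast
      ring
  · rw [if_neg hfull]
    have hz : (b - (a + s) + s - 1) / s = 0 :=
      Int.ediv_eq_zero_of_lt (by omega) (by omega)
    rw [hshift, hz]
    norm_num [List.range_succ]

-- an enumerate-flatMap where the extra emitter never fires is the list itself
theorem pvFlatMap_enum_nofire {α : Type} (cnd : Int → List α) :
    ∀ (ys : List α) (j : Int), (∀ i : Int, j ≤ i → i < j + ys.length → cnd i = []) →
      (PySem.List.enumerate ys j).flatMap (fun p => [p.2] ++ cnd p.1) = ys := by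
  intro ys
  induction ys with
  | nil => intro j _; simp [PySem.List.enumerate]
  | cons y t ih =>
    intro j h
    rw [PySem.List.enumerate_cons, List.flatMap_cons]
    have hj : cnd j = [] := h j (le_refl j) (by simp only [List.length_cons]; push_cast; omega)
    rw [hj, ih (j + 1) (fun i h1 h2 => h i (by omega) (by simp only [List.length_cons] at h2 ⊢; push_cast at h2 ⊢; omega))]
    simp

-- an enumerate-flatMap on a nonempty list where the emitter can fire only at the
-- last index is the list followed by the last emission
theorem pvFlatMap_enum_lastfire {α : Type} (cnd : Int → List α) :
    ∀ (ys : List α) (j : Int), ys ≠ [] →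
      (∀ i : Int, j ≤ i → i + 1 < j + ys.length → cnd i = []) →
      (PySem.List.enumerate ys j).flatMap (fun p => [p.2] ++ cnd p.1)
        = ys ++ cnd (j + ys.length - 1) := by
  intro ys
  induction ys with
  | nil => intro j h; exact absurd rfl h
  | cons y t ih =>
    intro j _ h
    rw [PySem.List.enumerate_cons, List.flatMap_cons]
    cases t with
    | nil =>
      simp [PySem.List.enumerate]
    | cons z t' =>
      have hj : cnd j = [] := h j (le_refl j) (by simp only [List.length_cons]; push_cast; omega)
      rw [hj, ih (j + 1) (by simp) (fun i h1 h2 => h i (by omega) (by simp only [List.length_cons] at h2 ⊢; push_cast at h2 ⊢; omega))]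
      have hidx : j + 1 + ((z :: t').length : Int) - 1 = j + ((y :: z :: t').length : Int) - 1 := by
        simp only [List.length_cons]; push_cast; omega
      rw [hidx]
      simp

-- the heart of the equivalence: A's chunked flatMap over range(a, n, stride)
-- equals B's element-wise flatMap over enumerate of the suffix from a,
-- for any start a ≥ 0 that is a multiple of stride
theorem pvChunkEq {α : Type} (xs : List α) (v : α) (use : Bool) (stride : Int)
    (hs : 0 < stride) :
    ∀ (m : Nat) (a : Int), 0 ≤ a → stride ∣ a → ((xs.length : Int) - a).toNat ≤ m →
    (PySem.List.pyRange a (xs.length : Int) stride).flatMap (fun start =>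
        PySem.List.slice xs (some start) (some (min (start + stride) (xs.length : Int))) ++
        (if min (start + stride) (xs.length : Int) < (xs.length : Int) ∧ use = true then [v] else []))
    = (PySem.List.enumerate (xs.drop a.toNat) a).flatMap (fun p =>
        [p.2] ++ (if use = true ∧ PySem.Int.mod (p.1 + 1) stride = 0 ∧ p.1 + 1 < (xs.length : Int) then [v] else [])) := by
  intro m
  induction m with
  | zero =>
    intro a ha _ hle
    have hna : (xs.length : Int) ≤ a := by omega
    rw [pvRange_pos_nil a _ hs hna]
    have hdrop : xs.drop a.toNat = [] := List.drop_eq_nil_of_le (by omega)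
    simp [hdrop]
  | succ m ih =>
    intro a ha hdvd hle
    by_cases hna : (xs.length : Int) ≤ a
    · rw [pvRange_pos_nil a _ hs hna]
      have hdrop : xs.drop a.toNat = [] := List.drop_eq_nil_of_le (by omega)
      simp [hdrop]
    · rw [not_le] at hna
      rw [pvRange_pos_cons a _ hs hna, List.flatMap_cons]
      -- no boundary index strictly inside a chunk: stride ∣ a and stride ∣ i+1
      -- with a < i+1 force a + stride ≤ i + 1
      have hkey : ∀ i : Int, a ≤ i → stride ∣ i + 1 → a + stride ≤ i + 1 := by
        intro i hi hdv
        have h1 : stride ∣ (i + 1 - a) := (Int.dvd_sub hdv hdvd)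
        have h2 : stride ≤ i + 1 - a := Int.le_of_dvd (by omega) h1
        omega
      by_cases hfull : a + stride < (xs.length : Int)
      · -- full interior chunk of length stride ending before the end of xs
        have hmin : min (a + stride) (xs.length : Int) = a + stride := min_eq_left (by omega)
        have htn : (a + stride).toNat = a.toNat + stride.toNat := by omega
        have hslice : PySem.List.slice xs (some a) (some (a + stride))
            = (xs.drop a.toNat).take stride.toNat := by
          rw [PySem.List.slice_toNat xs ha (by omega)]
          congr 1
          omega
        have hdecomp : xs.drop a.toNat
            = (xs.drop a.toNat).take stride.toNat ++ xs.drop (a + stride).toNat := by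
          conv_lhs => rw [← List.take_append_drop stride.toNat (xs.drop a.toNat)]
          rw [List.drop_drop, htn]
        have hchl : ((xs.drop a.toNat).take stride.toNat).length = stride.toNat := by
          rw [List.length_take, List.length_drop]
          omega
        rw [hdecomp, PySem.List.enumerate_append, List.flatMap_append, hchl]
        have hcast : a + (stride.toNat : Int) = a + stride := by omega
        rw [hcast]
        have hchunk := pvFlatMap_enum_lastfire
          (fun i => if use = true ∧ PySem.Int.mod (i + 1) stride = 0 ∧ i + 1 < (xs.length : Int) then [v] else [])
          ((xs.drop a.toNat).take stride.toNat) a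
          (by intro hnil; rw [hnil] at hchl; simp at hchl; omega)
          (by intro i hi hlt
              rw [hchl] at hlt
              dsimp only
              rw [if_neg]
              rintro ⟨_, hm, _⟩
              rw [PySem.Int.mod_eq_zero_iff_dvd] at hm
              have := hkey i hi hm
              omega)
        rw [hchunk, hchl]
        have hlast : a + (stride.toNat : Int) - 1 = a + stride - 1 := by omega
        rw [hlast]
        have hifeq : (if use = true ∧ PySem.Int.mod (a + stride - 1 + 1) stride = 0 ∧ a + stride - 1 + 1 < (xs.length : Int) then [v] else ([] : List α))
            = (if min (a + stride) (xs.length : Int) < (xs.length : Int) ∧ use = true then [v] else []) := by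
          have hm0 : PySem.Int.mod (a + stride - 1 + 1) stride = 0 := by
            rw [PySem.Int.mod_eq_zero_iff_dvd]
            have : a + stride - 1 + 1 = a + stride := by ring
            rw [this]
            exact dvd_add hdvd (dvd_refl stride)
          rw [hmin]
          by_cases hu : use = true
          · rw [if_pos ⟨hu, hm0, by omega⟩, if_pos ⟨by omega, hu⟩]
          · rw [if_neg (by tauto), if_neg (by tauto)]
        dsimp only
        rw [hifeq, hmin, hslice]
        rw [ih (a + stride) (by omega) (dvd_add hdvd (dvd_refl stride)) (by omega)]
      · -- final (possibly short) chunk: runs to the end of xs, no checkpoint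
        rw [not_lt] at hfull
        have hmin : min (a + stride) (xs.length : Int) = (xs.length : Int) := min_eq_right (by omega)
        rw [hmin]
        rw [pvRange_pos_nil (a + stride) _ hs (by omega), List.flatMap_nil]
        have hslice : PySem.List.slice xs (some a) (some (xs.length : Int)) = xs.drop a.toNat := by
          rw [PySem.List.slice_toNat xs ha (by omega)]
          apply List.take_of_length_le
          rw [List.length_drop]
          omega
        have hnof := pvFlatMap_enum_nofire
          (fun i => if use = true ∧ PySem.Int.mod (i + 1) stride = 0 ∧ i + 1 < (xs.length : Int) then [v] else [])
          (xs.drop a.toNat) a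
          (by intro i hi hlt
              rw [List.length_drop] at hlt
              dsimp only
              rw [if_neg]
              rintro ⟨_, hm, hend⟩
              rw [PySem.Int.mod_eq_zero_iff_dvd] at hm
              have := hkey i hi hm
              omega)
        rw [hnof, hslice]
        simp

-- B's two-or-one-element emission is the element followed by the optional checkpoint
theorem pvPairSplit {α : Type} (xs : List α) (v : α) (C : Int → Prop) [DecidablePred C] :
    (PySem.List.enumerate xs 0).flatMap (fun p => if C p.1 then [p.2, v] else [p.2])
      = (PySem.List.enumerate xs 0).flatMap (fun p => [p.2] ++ (if C p.1 then [v] else [])) := by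
  congr 1
  funext p
  split_ifs <;> simp

-- ===== VERDICT (by name: the statement is the Claim_ definition above) =====
theorem insert_checkpoints_with_labels_spec : Claim_equal_insert_checkpoints_with_labels := by
  intro token_ids labels stride ckpt_id use_ckpt _ hpre
  unfold Spec_insert_checkpoints_with_labels insert_checkpoints_with_labels insert_checkpoints_with_labels_alt
  have hlen : token_ids.length = labels.length := hpre
  rw [if_neg (not_not_intro hlen), if_neg (not_not_intro hlen)]
  by_cases hstr : stride ≤ 0
  · rw [if_pos hstr, if_pos hstr]
  · rw [if_neg hstr, if_neg hstr]
    have hs : 0 < stride := by omega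
    have hA : (PySem.List.pyRange 0 (token_ids.length : Int) stride).foldl
        (fun acc start =>
          let e := min (start + stride) (token_ids.length : Int)
          let out_tokens := acc.1 ++ PySem.List.slice token_ids (some start) (some e)
          let out_labels := acc.2 ++ PySem.List.slice labels (some start) (some e)
          if e < (token_ids.length : Int) ∧ use_ckpt = true then
            (out_tokens ++ [ckpt_id], out_labels ++ [0])
          else (out_tokens, out_labels)) ([], [])
        = ((PySem.List.pyRange 0 (token_ids.length : Int) stride).flatMap (fun start =>
             PySem.List.slice token_ids (some start) (some (min (start + stride) (token_ids.length : Int))) ++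
             (if min (start + stride) (token_ids.length : Int) < (token_ids.length : Int) ∧ use_ckpt = true then [ckpt_id] else [])),
           (PySem.List.pyRange 0 (token_ids.length : Int) stride).flatMap (fun start =>
             PySem.List.slice labels (some start) (some (min (start + stride) (token_ids.length : Int))) ++
             (if min (start + stride) (token_ids.length : Int) < (token_ids.length : Int) ∧ use_ckpt = true then [0] else []))) := by
      refine Eq.trans (PySem.List.foldl_congr_mem _ _
        (fun (acc : List Int × List Int) (start : Int) =>
          (acc.1 ++ (PySem.List.slice token_ids (some start) (some (min (start + stride) (token_ids.length : Int))) ++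
             (if min (start + stride) (token_ids.length : Int) < (token_ids.length : Int) ∧ use_ckpt = true then [ckpt_id] else [])),
           acc.2 ++ (PySem.List.slice labels (some start) (some (min (start + stride) (token_ids.length : Int))) ++
             (if min (start + stride) (token_ids.length : Int) < (token_ids.length : Int) ∧ use_ckpt = true then [0] else []))))
        _ ?_) ?_
      · intro acc x _
        dsimp only
        split_ifs <;> simp
      · rw [PySem.List.foldl_prod_mk
          (f := fun (acc : List Int) (start : Int) => acc ++
            (PySem.List.slice token_ids (some start) (some (min (start + stride) (token_ids.length : Int))) ++
             (if min (start + stride) (token_ids.length : Int) < (token_ids.length : Int) ∧ use_ckpt = true then [ckpt_id] else [])))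
          (g := fun (acc : List Int) (start : Int) => acc ++
            (PySem.List.slice labels (some start) (some (min (start + stride) (token_ids.length : Int))) ++
             (if min (start + stride) (token_ids.length : Int) < (token_ids.length : Int) ∧ use_ckpt = true then [0] else [])))]
        rw [PySem.List.foldl_append_eq_flatMap, PySem.List.foldl_append_eq_flatMap]
        simp
    rw [hA]
    refine Prod.ext ?_ ?_
    · dsimp only
      rw [pvPairSplit token_ids ckpt_id
            (fun i => use_ckpt = true ∧ PySem.Int.mod (i + 1) stride = 0 ∧ i + 1 < (token_ids.length : Int))]
      exact pvChunkEq token_ids ckpt_id use_ckpt stride hs token_ids.length 0 (le_refl 0) (dvd_zero stride) (by omega)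
    · dsimp only
      rw [pvPairSplit labels (0 : Int)
            (fun i => use_ckpt = true ∧ PySem.Int.mod (i + 1) stride = 0 ∧ i + 1 < (token_ids.length : Int))]
      rw [hpre]
      exact pvChunkEq labels (0 : Int) use_ckpt stride hs labels.length 0 (le_refl 0) (dvd_zero stride) (by omega)
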